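-- pv_equiv track=rewrite | github.com/SMMM25/RF-Arsenal--OS-V2.0 | modules/protocol/ais_decoder.py | _bit_destuff
-- ===== SOURCE A (Python) =====
-- def _bit_destuff(bits: str) -> str:
--     result = []
--     ones = 0
--     for bit in bits:
--         if bit == '1':
--             ones += 1
--             result.append(bit)
--         else:
--             if ones == 5:
--                 ones = 0
--             else:
--                 result.append(bit)
--                 ones = 0
--     return ''.join(result)
-- ===== SOURCE B (Python) =====
-- def _bit_destuff(bits: str) -> str:
--     # Run-based destuffing: emit maximal runs; after a run of exactly five '1's,
--     # drop the first character of the following non-'1' run.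
--     pieces = []
--     i = 0
--     n = len(bits)
--     while i < n:
--         if bits[i] == '1':
--             j = i
--             while j < n and bits[j] == '1':
--                 j += 1
--             pieces.append(bits[i:j])
--             if j - i == 5 and j < n:
--                 j += 1  # drop the stuffed (non-'1') character
--             i = j
--         else:
--             j = i
--             while j < n and bits[j] != '1':
--                 j += 1
--             pieces.append(bits[i:j])
--             i = j
--     return ''.join(pieces)
-- ===== Notes on version B (the rewrite author's own statement) =====
-- stated objective: alternative
-- what changed: Replaces the per-character counter state machine with a run-based scan: maximal runs of equal-class characters are emitted as slices, and after a ones-run of length exactly five the first character of the following run is dropped.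
import Mathlib
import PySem

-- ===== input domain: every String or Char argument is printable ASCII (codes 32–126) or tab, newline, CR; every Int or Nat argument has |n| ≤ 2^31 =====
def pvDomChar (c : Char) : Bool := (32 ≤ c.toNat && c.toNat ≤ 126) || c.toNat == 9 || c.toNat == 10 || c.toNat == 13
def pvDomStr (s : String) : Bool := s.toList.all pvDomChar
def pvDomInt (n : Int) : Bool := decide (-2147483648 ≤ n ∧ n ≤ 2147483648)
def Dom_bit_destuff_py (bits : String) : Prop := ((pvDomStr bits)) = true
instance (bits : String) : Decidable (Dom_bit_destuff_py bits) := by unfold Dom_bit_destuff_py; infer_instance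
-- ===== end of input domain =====

-- B replaces A's per-character counter state machine with a run-based scan (alternative decomposition, same cost).

-- ===== PORT A =====
-- A: fold over the characters carrying (result, ones); '1' appends and counts, any other char
-- is dropped exactly when the counter is 5, and resets the counter.
def bit_destuff_py (bits : String) : String :=
  let r := bits.toList.foldl
    (fun (st : List Char × Nat) bit =>
      if bit = '1' then (st.1 ++ [bit], st.2 + 1)
      else if st.2 = 5 then (st.1, 0)
      else (st.1 ++ [bit], 0))
    ([], 0)
  String.mk r.1

-- ===== PORT B =====
-- B: scan maximal runs (the two inner while-loops of Source B become takeWhile/dropWhile);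
-- after a run of exactly five '1's, drop the first character of the following run.
def destuffRuns : List Char → List Char
  | [] => []
  | c :: cs =>
    if c = '1' then
      let run := List.takeWhile (fun x => x == '1') (c :: cs)
      let rest := List.dropWhile (fun x => x == '1') (c :: cs)
      run ++ destuffRuns (if run.length = 5 then rest.drop 1 else rest)
    else
      let run := List.takeWhile (fun x => x != '1') (c :: cs)
      run ++ destuffRuns (List.dropWhile (fun x => x != '1') (c :: cs))
  termination_by l => l.length
  decreasing_by
  · have h := List.length_dropWhile_le (fun x => x == '1') cs
    simp [List.dropWhile, *]
    split
    · simp_all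
      omega
    · simp_all
  · rename_i hne
    have hb : (c != '1') = true := by simp [hne]
    have h := List.length_dropWhile_le (fun x => x != '1') cs
    simp [List.dropWhile, hb]
    omega

def bit_destuff_py_alt (bits : String) : String := String.mk (destuffRuns bits.toList)

-- ===== PRECONDITION & SPEC =====
def Spec_bit_destuff_py (bits : String) (out : String) : Prop := out = bit_destuff_py_alt bits
instance (bits : String) (out : String) : Decidable (Spec_bit_destuff_py bits out) := by unfold Spec_bit_destuff_py; infer_instance

-- ===== CLAIM (what is proved, stated in full; the proofs are below) =====
def Claim_equal_bit_destuff_py : Prop := ∀ (bits : String), Dom_bit_destuff_py bits → Spec_bit_destuff_py bits (bit_destuff_py bits)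

-- ===== LEMMAS AND PROOFS =====

-- A's state machine written as a direct recursion on the remaining input.
def destuffFrom (ones : Nat) : List Char → List Char
  | [] => []
  | b :: bs =>
    if b = '1' then b :: destuffFrom (ones + 1) bs
    else if ones = 5 then destuffFrom 0 bs
    else b :: destuffFrom 0 bs

theorem foldl_step_eq (l : List Char) : ∀ (res : List Char) (ones : Nat),
    (l.foldl (fun (st : List Char × Nat) bit =>
      if bit = '1' then (st.1 ++ [bit], st.2 + 1)
      else if st.2 = 5 then (st.1, 0)
      else (st.1 ++ [bit], 0)) (res, ones)).1 = res ++ destuffFrom ones l := by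
  induction l with
  | nil => intro res ones; simp [destuffFrom]
  | cons b bs ih =>
    intro res ones
    by_cases hb : b = '1'
    · simp [destuffFrom, hb, ih]
    · by_cases h5 : ones = 5 <;> simp [destuffFrom, hb, h5, ih]

theorem destuffFrom_ones_run (run : List Char) (h : ∀ c ∈ run, c = '1') :
    ∀ (m : Nat) (rest : List Char),
    destuffFrom m (run ++ rest) = run ++ destuffFrom (m + run.length) rest := by
  induction run with
  | nil => simp
  | cons c cs ih =>
    intro m rest
    have hc : c = '1' := h c (by simp)
    have hcs : ∀ x ∈ cs, x = '1' := fun x hx => h x (by simp [hx])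
    simp [destuffFrom, hc, ih hcs]
    ring_nf

theorem destuffFrom_nonones_run (run : List Char) (h : ∀ c ∈ run, c ≠ '1') :
    ∀ (rest : List Char),
    destuffFrom 0 (run ++ rest) = run ++ destuffFrom 0 rest := by
  induction run with
  | nil => simp
  | cons c cs ih =>
    intro rest
    have hc : c ≠ '1' := h c (by simp)
    have hcs : ∀ x ∈ cs, x ≠ '1' := fun x hx => h x (by simp [hx])
    simp [destuffFrom, hc, ih hcs]

theorem destuffFrom_reset (m : Nat) (c : Char) (cs : List Char) (hc : c ≠ '1') (hm : m ≠ 5) :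
    destuffFrom m (c :: cs) = destuffFrom 0 (c :: cs) := by
  simp [destuffFrom, hc, hm]

theorem destuffFrom_five (c : Char) (cs : List Char) (hc : c ≠ '1') :
    destuffFrom 5 (c :: cs) = destuffFrom 0 cs := by
  simp [destuffFrom, hc]

-- head of a dropWhile result fails the predicate
theorem dropWhile_head_false (p : Char → Bool) (l : List Char) (d : Char) (ds : List Char)
    (h : List.dropWhile p l = d :: ds) : p d = false := by
  induction l with
  | nil => simp at h
  | cons a as ih =>
    rw [List.dropWhile_cons] at h
    split at h
    · exact ih h
    · cases h; simp_all

theorem destuffFrom_eq_runs : ∀ (n : Nat) (l : List Char), l.length ≤ n →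
    destuffFrom 0 l = destuffRuns l := by
  intro n
  induction n with
  | zero =>
    intro l hl
    have : l = [] := List.eq_nil_of_length_eq_zero (Nat.le_zero.mp hl)
    simp [this, destuffFrom, destuffRuns]
  | succ n ih =>
    intro l hl
    match l with
    | [] => simp [destuffFrom, destuffRuns]
    | c :: cs =>
      by_cases hc : c = '1'
      · -- ones run
        obtain ⟨run, rest, hrun, hrest⟩ :
            ∃ run rest, run = List.takeWhile (fun x => x == '1') (c :: cs) ∧
              rest = List.dropWhile (fun x => x == '1') (c :: cs) := ⟨_, _, rfl, rfl⟩
        have hsplit : run ++ rest = c :: cs := by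
          rw [hrun, hrest]; exact List.takeWhile_append_dropWhile
        have hall : ∀ x ∈ run, x = '1' := by
          intro x hx
          rw [hrun] at hx
          simpa using List.mem_takeWhile_imp hx
        have hrunlen : 1 ≤ run.length := by
          rw [hrun]; simp [List.takeWhile, hc]
        have hlen : run.length + rest.length = cs.length + 1 := by
          have := congrArg List.length hsplit; simpa using this
        have hA : destuffFrom 0 (c :: cs) = run ++ destuffFrom run.length rest := by
          conv_lhs => rw [← hsplit]
          simpa using destuffFrom_ones_run run hall 0 rest
        have hB : destuffRuns (c :: cs)
            = run ++ destuffRuns (if run.length = 5 then rest.drop 1 else rest) := by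
          rw [destuffRuns, if_pos hc, ← hrun, ← hrest]
        rw [hA, hB]
        congr 1
        by_cases h5 : run.length = 5
        · simp only [h5, reduceIte]
          rw [h5] at hlen
          match hr : rest, hrest with
          | [], _ => simp [destuffFrom, destuffRuns]
          | d :: ds, hrest =>
            have hd' : d ≠ '1' := by
              have := dropWhile_head_false (fun x => x == '1') (c :: cs) d ds hrest.symm
              simpa using this
            rw [destuffFrom_five d ds hd']
            simp only [List.drop_succ_cons, List.drop_zero]
            apply ih
            have : (d :: ds).length = rest.length := by rw [hr]
            simp at this hl hlen ⊢
            omega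
        · simp only [if_neg h5]
          match hr : rest, hrest with
          | [], _ => simp [destuffFrom, destuffRuns]
          | d :: ds, hrest =>
            have hd' : d ≠ '1' := by
              have := dropWhile_head_false (fun x => x == '1') (c :: cs) d ds hrest.symm
              simpa using this
            rw [destuffFrom_reset run.length d ds hd' h5]
            apply ih
            have : (d :: ds).length = rest.length := by rw [hr]
            simp at this hl hlen ⊢
            omega
      · -- non-ones run
        obtain ⟨run, rest, hrun, hrest⟩ :
            ∃ run rest, run = List.takeWhile (fun x => x != '1') (c :: cs) ∧
              rest = List.dropWhile (fun x => x != '1') (c :: cs) := ⟨_, _, rfl, rfl⟩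
        have hsplit : run ++ rest = c :: cs := by
          rw [hrun, hrest]; exact List.takeWhile_append_dropWhile
        have hall : ∀ x ∈ run, x ≠ '1' := by
          intro x hx
          rw [hrun] at hx
          simpa using List.mem_takeWhile_imp hx
        have hrunlen : 1 ≤ run.length := by
          have hb : (c != '1') = true := by simp [hc]
          rw [hrun]; simp [List.takeWhile, hb]
        have hlen : run.length + rest.length = cs.length + 1 := by
          have := congrArg List.length hsplit; simpa using this
        have hA : destuffFrom 0 (c :: cs) = run ++ destuffFrom 0 rest := by
          conv_lhs => rw [← hsplit]
          exact destuffFrom_nonones_run run hall rest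
        have hB : destuffRuns (c :: cs) = run ++ destuffRuns rest := by
          rw [destuffRuns, if_neg hc, ← hrun, ← hrest]
        rw [hA, hB]
        congr 1
        apply ih
        simp at hl
        omega

-- ===== VERDICT (by name: the statement is the Claim_ definition above) =====
theorem bit_destuff_py_spec : Claim_equal_bit_destuff_py := by
  intro bits _
  unfold Spec_bit_destuff_py bit_destuff_py bit_destuff_py_alt
  simp only [foldl_step_eq, List.nil_append]
  rw [destuffFrom_eq_runs bits.toList.length bits.toList (le_refl _)]
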